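-- pv_equiv track=rewrite | github.com/faisyed/CodeJam | leetcode/algo/easy/2315.py | countAsterisks
-- ===== SOURCE A (Python) =====
-- def countAsterisks(s: str) -> int:
--     enc = False
--     cnt = 0
--     for ch in s:
--         if ch == "*" and not enc:
--             cnt+=1
--         if ch == "|":
--             enc = not enc
--     return cnt
-- ===== SOURCE B (Python) =====
-- def countAsterisks(s: str) -> int:
--     return sum(part.count('*') for i, part in enumerate(s.split('|')) if i % 2 == 0)
-- ===== Notes on version B (the rewrite author's own statement) =====
-- stated objective: idiomatic
-- what changed: Replaces the character-by-character toggle state machine with splitting the string on the pipe separator and summing the asterisk counts of the even-indexed segments (the regions outside pipe pairs).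
import Mathlib
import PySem

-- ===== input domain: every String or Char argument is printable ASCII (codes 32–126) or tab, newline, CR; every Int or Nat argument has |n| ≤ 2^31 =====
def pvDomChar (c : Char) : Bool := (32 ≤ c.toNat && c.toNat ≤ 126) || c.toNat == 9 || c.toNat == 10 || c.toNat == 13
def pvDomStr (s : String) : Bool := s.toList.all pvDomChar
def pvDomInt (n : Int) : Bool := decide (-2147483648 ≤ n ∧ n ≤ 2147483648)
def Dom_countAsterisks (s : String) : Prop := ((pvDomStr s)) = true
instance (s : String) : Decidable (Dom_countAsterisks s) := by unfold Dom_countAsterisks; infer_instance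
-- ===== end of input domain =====

set_option maxRecDepth 8192


-- B replaces A's character-by-character toggle state machine by splitting on '|'
-- and summing the '*' counts of the even-indexed segments (objective: idiomatic).

-- ===== PORT A =====
def countAsterisks (s : String) : Int :=
  (s.toList.foldl (fun (st : Bool × Int) ch =>
      let cnt : Int := if ch == '*' && !st.1 then st.2 + 1 else st.2
      let enc : Bool := if ch == '|' then !st.1 else st.1
      (enc, cnt)) (false, 0)).2

-- ===== PORT B =====
def countAsterisks_alt (s : String) : Int :=
  (((PySem.List.enumerate (PySem.Chars.splitOn s.toList ['|'])).filter
      (fun ip => PySem.Int.mod ip.1 2 == 0)).map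
    (fun ip => (PySem.Chars.count ip.2 ['*'] : Int))).sum

-- ===== PRECONDITION & SPEC =====
def Spec_countAsterisks (s : String) (out : Int) : Prop := out = countAsterisks_alt s
instance (s : String) (out : Int) : Decidable (Spec_countAsterisks s out) := by unfold Spec_countAsterisks; infer_instance

-- ===== CLAIM (what is proved, stated in full; the proofs are below) =====
def Claim_equal_countAsterisks : Prop := ∀ (s : String), Dom_countAsterisks s → Spec_countAsterisks s (countAsterisks s)

-- ===== LEMMAS AND PROOFS =====

/-- Structural version of `s.split('|')` for the single-character separator `'|'`. -/
def spl : List Char → List (List Char)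
  | [] => [[]]
  | c :: cs =>
    if c = '|' then [] :: spl cs
    else
      match spl cs with
      | [] => [[c]]
      | h :: t => (c :: h) :: t

lemma spl_ne_nil (cs : List Char) : spl cs ≠ [] := by
  cases cs with
  | nil => simp [spl]
  | cons c cs =>
    simp only [spl]
    split_ifs
    · simp
    · split <;> simp

lemma spl_pipe (cs : List Char) : spl ('|' :: cs) = [] :: spl cs := by
  rw [spl]; simp

lemma spl_cons_of_ne {c : Char} (hc : c ≠ '|') {cs : List Char} {sh : List Char}
    {st : List (List Char)} (hsp : spl cs = sh :: st) : spl (c :: cs) = (c :: sh) :: st := by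
  rw [spl]; simp [hc, hsp]

/-- Prepend a prefix onto the first segment. -/
def consApp (p : List Char) : List (List Char) → List (List Char)
  | [] => [p]
  | h :: t => (p ++ h) :: t

lemma go_splitOn (fuel : Nat) : ∀ (l cur : List Char) (accs : List (List Char)),
    l.length < fuel →
    PySem.Chars.splitOn.go ['|'] fuel l cur accs = accs.reverse ++ consApp cur.reverse (spl l) := by
  induction fuel with
  | zero => intro l cur accs h; omega
  | succ fuel ih =>
    intro l cur accs h
    cases l with
    | nil =>
      simp [PySem.Chars.splitOn.go, spl, consApp]
    | cons c rest =>
      by_cases hc : c = '|'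
      · subst hc
        have hpre : List.isPrefixOf ['|'] ('|' :: rest) = true := by
          simp [List.isPrefixOf]
        rw [PySem.Chars.splitOn.go]
        simp only [hpre, if_true, List.length_cons, List.drop_succ_cons, List.length_nil, List.drop_zero]
        rw [ih rest [] (cur.reverse :: accs) (by simpa using Nat.lt_of_succ_lt_succ h)]
        have hne := spl_ne_nil rest
        cases hsp : spl rest with
        | nil => exact absurd hsp hne
        | cons sh st =>
          rw [spl_pipe, hsp]; simp [consApp]
      · have hpre : List.isPrefixOf ['|'] (c :: rest) = false := by
          simp [List.isPrefixOf, Ne.symm hc]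
        rw [PySem.Chars.splitOn.go]
        simp only [hpre, Bool.false_eq_true, if_false]
        rw [ih rest (c :: cur) accs (by simpa using Nat.lt_of_succ_lt_succ h)]
        have hne := spl_ne_nil rest
        cases hsp : spl rest with
        | nil => exact absurd hsp hne
        | cons sh st => rw [spl_cons_of_ne hc hsp]; simp [consApp]

lemma splitOn_pipe (cs : List Char) : PySem.Chars.splitOn cs ['|'] = spl cs := by
  have h := go_splitOn (cs.length + 1) cs [] [] (by omega)
  have hne := spl_ne_nil cs
  cases hsp : spl cs with
  | nil => exact absurd hsp hne
  | cons sh st =>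
    simp only [PySem.Chars.splitOn, h, hsp, consApp, List.reverse_nil, List.nil_append]

lemma go_count (fuel : Nat) : ∀ (l : List Char) (acc : Nat), l.length ≤ fuel →
    PySem.Chars.count.go ['*'] fuel l acc = acc + l.count '*' := by
  induction fuel with
  | zero =>
    intro l acc h
    have : l = [] := List.eq_nil_of_length_eq_zero (Nat.le_zero.mp h)
    subst this; simp [PySem.Chars.count.go]
  | succ fuel ih =>
    intro l acc h
    cases l with
    | nil => simp [PySem.Chars.count.go]
    | cons c rest =>
      by_cases hc : c = '*'
      · subst hc
        have hpre : List.isPrefixOf ['*'] ('*' :: rest) = true := by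
          simp [List.isPrefixOf]
        rw [PySem.Chars.count.go]
        simp only [hpre, if_true, List.length_cons, List.drop_succ_cons, List.length_nil, List.drop_zero]
        rw [ih rest (acc + 1) (by simpa using Nat.le_of_succ_le_succ h)]
        simp; omega
      · have hpre : List.isPrefixOf ['*'] (c :: rest) = false := by
          simp [List.isPrefixOf, Ne.symm hc]
        rw [PySem.Chars.count.go]
        simp only [hpre, Bool.false_eq_true, if_false]
        rw [ih rest acc (by simpa using Nat.le_of_succ_le_succ h)]
        simp [hc]

lemma count_star (l : List Char) : PySem.Chars.count l ['*'] = l.count '*' := by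
  simp only [PySem.Chars.count, List.isEmpty, Bool.false_eq_true, if_false]
  simpa using go_count l.length l 0 le_rfl

/-- Alternating sum of '*'-counts over segments: skip the segments at the `true` phases. -/
def gcount : Bool → List (List Char) → Int
  | _, [] => 0
  | b, h :: t => (if b then 0 else (h.count '*' : Int)) + gcount (!b) t

lemma foldl_eq (cs : List Char) : ∀ (enc : Bool) (cnt : Int),
    (cs.foldl (fun (st : Bool × Int) ch =>
      let cnt : Int := if ch == '*' && !st.1 then st.2 + 1 else st.2
      let enc : Bool := if ch == '|' then !st.1 else st.1
      (enc, cnt)) (enc, cnt)).2 = cnt + gcount enc (spl cs) := by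
  induction cs with
  | nil => intro enc cnt; cases enc <;> simp [spl, gcount]
  | cons c cs ih =>
    intro enc cnt
    simp only [List.foldl_cons]
    rw [ih]
    by_cases hc : c = '|'
    · subst hc; rw [spl_pipe]; cases enc <;> simp [gcount]
    · have hne := spl_ne_nil cs
      cases hsp : spl cs with
      | nil => exact absurd hsp hne
      | cons sh st =>
        by_cases hs : c = '*'
        · subst hs
          rw [spl_cons_of_ne hc hsp]
          cases enc with
          | false => simp [gcount]; ring
          | true => simp [gcount]
        · rw [spl_cons_of_ne hc hsp]
          cases enc <;> simp [gcount, hc, hs]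

lemma sum_enum (parts : List (List Char)) : ∀ (k : Int), 0 ≤ k →
    (((PySem.List.enumerate parts k).filter
        (fun ip => PySem.Int.mod ip.1 2 == 0)).map
      (fun ip => (PySem.Chars.count ip.2 ['*'] : Int))).sum
      = if PySem.Int.mod k 2 = 0 then gcount false parts else gcount true parts := by
  induction parts with
  | nil => intro k _; simp [PySem.List.enumerate_nil, gcount]
  | cons h t ih =>
    intro k hk
    have h2 : (0 : Int) < 2 := by omega
    have hmk : PySem.Int.mod k 2 = k % 2 := PySem.Int.mod_eq_emod_of_pos h2
    have hmk1 : PySem.Int.mod (k + 1) 2 = (k + 1) % 2 := PySem.Int.mod_eq_emod_of_pos h2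
    rw [PySem.List.enumerate_cons]
    by_cases hp : k % 2 = 0
    · have hp1 : (k + 1) % 2 = 1 := by omega
      simp only [List.filter_cons, hmk, hp, beq_self_eq_true, if_true, List.map_cons,
        List.sum_cons]
      rw [ih (k + 1) (by omega), hmk1, hp1]
      simp [count_star, gcount]
    · have hp0 : k % 2 = 1 := by omega
      have hp1 : (k + 1) % 2 = 0 := by omega
      have hcne : ((1 : Int) == 0) = false := by decide
      simp only [List.filter_cons, hmk, hp0, hcne, Bool.false_eq_true, if_false]
      rw [ih (k + 1) (by omega), hmk1, hp1]
      simp [gcount]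

-- ===== VERDICT (by name: the statement is the Claim_ definition above) =====
theorem countAsterisks_spec : Claim_equal_countAsterisks := by
  intro s _
  unfold Spec_countAsterisks countAsterisks countAsterisks_alt
  rw [splitOn_pipe, foldl_eq, sum_enum _ 0 le_rfl]
  simp [PySem.Int.mod]
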